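-- pv_equiv track=rewrite | github.com/hahyuning/Coding-test-study | baekjoon/시뮬레이션과 구현 (Hard)/배열/20327 배열 돌리기6.py | operation8
-- ===== SOURCE A (Python) =====
-- def operation8(a, l):
--     n = len(a)
--     ans = [[0] * n for _ in range(n)]
--     sub_size = (1 << l)
--     sub_count = n // sub_size
--     for i in range(sub_count):
--         for j in range(sub_count):
--             x1 = i * sub_size
--             y1 = j * sub_size
--             x2 = j * sub_size
--             y2 = (sub_count - i - 1) * sub_size
--             for x in range(sub_size):
--                 for y in range(sub_size):
--                     ans[x1 + x][y1 + y] = a[x2 + x][y2 + y]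
--     return ans
-- ===== SOURCE B (Python) =====
-- def operation8(a, l):
--     # Two staged passes: (1) transpose the block grid (block (i,j) <- block (j,i),
--     # blocks copied verbatim via row slicing), (2) reverse the block rows of that
--     # intermediate and pad with zeros to n x n; the composition equals the CCW
--     # block rotation ans_block[i][j] = a_block[j][k-1-i].
--     n = len(a)
--     sub_size = 1 << l
--     sub_count = n // sub_size
--     m = sub_count * sub_size
--     pad = n - m
--     # pass 1: block-grid transpose
--     trans = []
--     for i in range(sub_count):
--         for x in range(sub_size):
--             row = []
--             for j in range(sub_count):
--                 row.extend(a[j * sub_size + x][i * sub_size : i * sub_size + sub_size])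
--             trans.append(row)
--     # pass 2: reverse the block rows, pad to n x n
--     ans = []
--     for i in range(sub_count - 1, -1, -1):
--         for x in range(sub_size):
--             ans.append(trans[i * sub_size + x] + [0] * pad)
--     for _ in range(pad):
--         ans.append([0] * n)
--     return ans
-- ===== Notes on version B (the rewrite author's own statement) =====
-- stated objective: alternative
-- what changed: Replaces A's single nested block-copy (each cell written once by a 4-deep loop into a zero matrix) by two staged whole-row passes: first a block-grid transpose built by concatenating row slices of each source block, then a reversal of the block rows plus zero padding; the composition transpose-then-flip equals A's one-step CCW block mapping.
-- outside the precondition, e.g. on operation8([[1, 2], [3, 4]], -1): A raises ValueError, B raises ValueError; on operation8([[1, 2], [3]], 0): A raises IndexError, B returns [[2], [1, 3]]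
import Mathlib
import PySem

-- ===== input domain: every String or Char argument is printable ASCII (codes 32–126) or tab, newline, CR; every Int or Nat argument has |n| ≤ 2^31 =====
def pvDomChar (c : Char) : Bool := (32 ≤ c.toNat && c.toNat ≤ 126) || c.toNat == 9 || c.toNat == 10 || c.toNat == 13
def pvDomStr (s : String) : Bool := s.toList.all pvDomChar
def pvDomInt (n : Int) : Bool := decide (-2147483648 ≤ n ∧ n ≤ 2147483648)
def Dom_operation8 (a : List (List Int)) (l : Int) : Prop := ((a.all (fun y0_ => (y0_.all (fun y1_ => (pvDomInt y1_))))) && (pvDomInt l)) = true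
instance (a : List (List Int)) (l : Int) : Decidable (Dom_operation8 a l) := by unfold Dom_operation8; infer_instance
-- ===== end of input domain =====

-- B replaces A's one-step 4-deep block-copy by two staged row-level passes
-- (block-grid transpose via row slices, then reversal of the block rows + zero padding);
-- same asymptotic cost, a different decomposition of the same rotation.

-- ===== PORT A =====
-- `ans[r][c] = v` on a list-of-lists
def writeCell (m : List (List Int)) (r c : Nat) (v : Int) : List (List Int) :=
  m.modify r (fun row => row.set c v)

-- literal port of A; indexing a[..][..] is ported as getD — Pre_operation8 guarantees it is in range,
-- exactly where Python does not raise IndexError; 1 << l is 2^l.toNat, Pre_ demands 0 ≤ l.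
def operation8 (a : List (List Int)) (l : Int) : List (List Int) :=
  let n := a.length
  let ans := List.replicate n (List.replicate n (0 : Int))
  let s := 2 ^ l.toNat
  let k := n / s
  (List.range k).foldl (fun ans i =>
    (List.range k).foldl (fun ans j =>
      let x1 := i * s; let y1 := j * s; let x2 := j * s; let y2 := (k - i - 1) * s
      (List.range s).foldl (fun ans x =>
        (List.range s).foldl (fun ans y =>
          writeCell ans (x1 + x) (y1 + y) ((a.getD (x2 + x) []).getD (y2 + y) 0)) ans) ans) ans) ans

-- ===== PORT B =====
-- literal port of Source B: row slices a[r][i*s : i*s+s] are PySem.List.slice; the two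
-- append-loops building `trans` and `ans` are flatMap/map over the same ranges,
-- `range(k-1,-1,-1)` is (List.range k).reverse; trans[..] is getD (always in range).
def operation8_alt (a : List (List Int)) (l : Int) : List (List Int) :=
  let n := a.length
  let s := 2 ^ l.toNat
  let k := n / s
  let m := k * s
  let pad := n - m
  let trans := (List.range k).flatMap (fun i => (List.range s).map (fun x =>
    (List.range k).flatMap (fun j =>
      PySem.List.slice (a.getD (j * s + x) []) (some ((i * s : Nat) : Int)) (some ((i * s + s : Nat) : Int)))))
  ((List.range k).reverse.flatMap (fun i => (List.range s).map (fun x =>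
    trans.getD (i * s + x) [] ++ List.replicate pad (0 : Int))))
  ++ List.replicate pad (List.replicate n (0 : Int))

-- ===== PRECONDITION & SPEC =====
-- Pre_ excludes exactly the inputs where Python A raises: l < 0 (ValueError on 1 << l) and ragged
-- inputs whose first (n//2^l)*2^l rows are shorter than (n//2^l)*2^l (IndexError).
def Pre_operation8 (a : List (List Int)) (l : Int) : Prop :=
  0 ≤ l ∧ ∀ row ∈ a.take ((a.length / 2 ^ l.toNat) * 2 ^ l.toNat),
    (a.length / 2 ^ l.toNat) * 2 ^ l.toNat ≤ row.length
instance (a : List (List Int)) (l : Int) : Decidable (Pre_operation8 a l) := by unfold Pre_operation8; infer_instance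
def pvWitness_operation8 : List (List Int) × Int := ([[1, 2], [3, 4]], 0)

def Spec_operation8 (a : List (List Int)) (l : Int) (out : List (List Int)) : Prop := out = operation8_alt a l
instance (a : List (List Int)) (l : Int) (out : List (List Int)) : Decidable (Spec_operation8 a l out) := by unfold Spec_operation8; infer_instance

-- ===== CLAIM (what is proved, stated in full; the proofs are below) =====
def Claim_equal_operation8 : Prop := ∀ (a : List (List Int)) (l : Int), Dom_operation8 a l → Pre_operation8 a l → Spec_operation8 a l (operation8 a l)

-- ===== LEMMAS AND PROOFS =====

-- read ans[r][c] (0 outside)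
def get2 (m : List (List Int)) (r c : Nat) : Int := (m.getD r []).getD c 0

-- rectangular n × n matrix
def Rect (n : Nat) (m : List (List Int)) : Prop := m.length = n ∧ ∀ row ∈ m, row.length = n

-- the value both programs place at cell (r, c) of the rotated region
def gval (a : List (List Int)) (s k r c : Nat) : Int :=
  (a.getD ((c / s) * s + r % s) []).getD ((k - 1 - r / s) * s + c % s) 0

def writeAll (g : Nat → Nat → Int) (m : List (List Int)) (L : List (Nat × Nat)) : List (List Int) :=
  L.foldl (fun m rc => writeCell m rc.1 rc.2 (g rc.1 rc.2)) m

theorem rect_writeCell {n : Nat} {m : List (List Int)} (h : Rect n m) (r c : Nat) (v : Int) :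
    Rect n (writeCell m r c v) := by
  obtain ⟨h1, h2⟩ := h
  refine ⟨by simp [writeCell, h1], ?_⟩
  intro row hrow
  rw [List.mem_iff_getElem] at hrow
  obtain ⟨i, hilen, rfl⟩ := hrow
  have hlen : i < m.length := by simpa [writeCell] using hilen
  simp only [writeCell, List.getElem_modify]
  split
  · simpa using h2 _ (List.getElem_mem hlen)
  · exact h2 _ (List.getElem_mem hlen)

theorem get2_writeCell_self {m : List (List Int)} {r c : Nat} (v : Int)
    (hr : r < m.length) (hc : c < (m.getD r []).length) :
    get2 (writeCell m r c v) r c = v := by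
  simp [get2, writeCell, List.getD, hr, List.getElem?_set]
  have hc' : c < m[r].length := by
    simpa [List.getD, List.getElem?_eq_getElem, hr] using hc
  simp [hc']

theorem get2_writeCell_ne {m : List (List Int)} {r c r' c' : Nat} (v : Int)
    (h : ¬(r' = r ∧ c' = c)) :
    get2 (writeCell m r c v) r' c' = get2 m r' c' := by
  by_cases hr : r' = r
  · subst hr
    have hc : c' ≠ c := by tauto
    simp [get2, writeCell, List.getD]
    cases hmr : m[r']? with
    | none => simp
    | some row => simp [List.getElem?_set_ne (Ne.symm hc)]
  · have hne : r ≠ r' := fun h => hr h.symm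
    simp only [get2, writeCell, List.getD, List.getElem?_modify]
    cases m[r']? <;> simp [hne]

theorem rect_writeAll {n : Nat} {m : List (List Int)} (g : Nat → Nat → Int)
    (L : List (Nat × Nat)) (h : Rect n m) : Rect n (writeAll g m L) := by
  induction L generalizing m with
  | nil => exact h
  | cons rc L ih => exact ih (rect_writeCell h _ _ _)

theorem get2_writeAll {n : Nat} (g : Nat → Nat → Int) (L : List (Nat × Nat))
    {m : List (List Int)} (hm : Rect n m)
    (hL : ∀ rc ∈ L, rc.1 < n ∧ rc.2 < n) (r c : Nat) :
    get2 (writeAll g m L) r c = if (r, c) ∈ L then g r c else get2 m r c := by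
  induction L generalizing m with
  | nil => simp [writeAll]
  | cons rc L ih =>
    have hrc := hL rc (by simp)
    have hstep : writeAll g m (rc :: L) = writeAll g (writeCell m rc.1 rc.2 (g rc.1 rc.2)) L := rfl
    rw [hstep, ih (rect_writeCell hm _ _ _) (fun x hx => hL x (by simp [hx]))]
    by_cases hmem : (r, c) ∈ L
    · simp [hmem]
    · simp only [hmem, if_false, List.mem_cons]
      by_cases heq : (r, c) = rc
      · have hr : rc.1 < m.length := by rw [hm.1]; exact hrc.1
        have hc : rc.2 < (m.getD rc.1 []).length := by
          have : m.getD rc.1 [] = m[rc.1] := by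
            simp [List.getD, hr]
          rw [this, hm.2 _ (List.getElem_mem hr)]; exact hrc.2
        rcases heq with rfl
        simp [get2_writeCell_self _ hr hc]
      · rw [get2_writeCell_ne]
        · simp [heq]
        · intro ⟨h1, h2⟩; exact heq (by cases rc; simp_all)

def cells (s k : Nat) : List (Nat × Nat) :=
  (List.range k).flatMap (fun i => (List.range k).flatMap (fun j =>
    (List.range s).flatMap (fun x => (List.range s).map (fun y => (i * s + x, j * s + y)))))

theorem foldl_flatMap {α β γ : Type} (f : γ → β → γ) (h : α → List β) (L : List α) (b : γ) :
    (L.flatMap h).foldl f b = L.foldl (fun b x => (h x).foldl f b) b := by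
  induction L generalizing b with
  | nil => rfl
  | cons x L ih => simp [List.flatMap_cons, List.foldl_append, ih]

theorem idx_div {s i x : Nat} (hx : x < s) : (i * s + x) / s = i := by
  rw [Nat.add_comm, Nat.add_mul_div_right _ _ (by omega : 0 < s), Nat.div_eq_of_lt hx,
    Nat.zero_add]

theorem idx_mod {s i x : Nat} (hx : x < s) : (i * s + x) % s = x := by
  rw [Nat.add_comm, Nat.add_mul_mod_self_right]
  exact Nat.mod_eq_of_lt hx

theorem mem_cells {s k r c : Nat} : (r, c) ∈ cells s k ↔ r < k * s ∧ c < k * s := by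
  simp only [cells, List.mem_flatMap, List.mem_map, List.mem_range, Prod.mk.injEq]
  constructor
  · rintro ⟨i, hi, j, hj, x, hx, y, hy, rfl, rfl⟩
    constructor
    · calc i * s + x < (i + 1) * s := by rw [Nat.add_mul, Nat.one_mul]; omega
        _ ≤ k * s := Nat.mul_le_mul_right _ hi
    · calc j * s + y < (j + 1) * s := by rw [Nat.add_mul, Nat.one_mul]; omega
        _ ≤ k * s := Nat.mul_le_mul_right _ hj
  · rintro ⟨hr, hc⟩
    have hs : 0 < s := by
      rcases Nat.eq_zero_or_pos s with h | h
      · subst h; simp at hr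
      · exact h
    exact ⟨r / s, (Nat.div_lt_iff_lt_mul hs).2 hr, c / s,
      (Nat.div_lt_iff_lt_mul hs).2 hc, r % s, Nat.mod_lt _ hs, c % s, Nat.mod_lt _ hs,
      by rw [Nat.mul_comm]; exact Nat.div_add_mod r s, by rw [Nat.mul_comm]; exact Nat.div_add_mod c s⟩

theorem operation8_eq_writeAll (a : List (List Int)) (l : Int) :
    operation8 a l = writeAll (gval a (2 ^ l.toNat) (a.length / 2 ^ l.toNat))
      (List.replicate a.length (List.replicate a.length (0 : Int)))
      (cells (2 ^ l.toNat) (a.length / 2 ^ l.toNat)) := by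
  unfold operation8 writeAll cells
  simp only [foldl_flatMap, List.foldl_map]
  apply List.foldl_ext; intro m i hi
  apply List.foldl_ext; intro m j hj
  apply List.foldl_ext; intro m x hx
  apply List.foldl_ext; intro m y hy
  simp only [List.mem_range] at hx hy
  congr 1
  simp only [gval, idx_div hx, idx_mod hx, idx_div hy, idx_mod hy, Nat.sub_sub,
    Nat.add_comm 1]

theorem get2_zeros (n : Nat) (r c : Nat) :
    get2 (List.replicate n (List.replicate n (0 : Int))) r c = 0 := by
  simp only [get2, List.getD, List.getElem?_replicate]
  split
  · simp [List.getElem?_replicate]; split <;> simp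
  · simp

theorem rect_zeros (n : Nat) : Rect n (List.replicate n (List.replicate n (0 : Int))) := by
  constructor
  · simp
  · intro row hrow; simp_all [List.eq_of_mem_replicate hrow]

theorem cells_lt {s k n : Nat} (hks : k * s ≤ n) : ∀ rc ∈ cells s k, rc.1 < n ∧ rc.2 < n := by
  rintro ⟨r, c⟩ h
  have := mem_cells.1 h
  omega

theorem get2_operation8 (a : List (List Int)) (l : Int) (r c : Nat) :
    get2 (operation8 a l) r c =
      if r < (a.length / 2 ^ l.toNat) * 2 ^ l.toNat ∧ c < (a.length / 2 ^ l.toNat) * 2 ^ l.toNat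
      then gval a (2 ^ l.toNat) (a.length / 2 ^ l.toNat) r c else 0 := by
  rw [operation8_eq_writeAll,
    get2_writeAll _ _ (rect_zeros a.length) (cells_lt (Nat.div_mul_le_self _ _)),
    get2_zeros]
  simp [mem_cells]

theorem rect_operation8 (a : List (List Int)) (l : Int) : Rect a.length (operation8 a l) := by
  rw [operation8_eq_writeAll]
  exact rect_writeAll _ _ (rect_zeros _)

-- ── B-side lemmas ──

-- length and elements of a flatMap whose pieces all have length s
theorem flatMap_uniform_length {α β : Type} (L : List α) (f : α → List β) (s : Nat)
    (h : ∀ x ∈ L, (f x).length = s) : (L.flatMap f).length = L.length * s := by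
  induction L with
  | nil => simp
  | cons x L ih =>
    simp only [List.flatMap_cons, List.length_append, List.length_cons,
      h x (by simp), ih (fun y hy => h y (by simp [hy]))]
    ring

theorem flatMap_uniform_getD {α β : Type} (L : List α) (f : α → List β) (s : Nat)
    (h : ∀ x ∈ L, (f x).length = s) (q : Nat) (hq : q < L.length * s)
    (dα : α) (dβ : β) :
    (L.flatMap f).getD q dβ = (f (L.getD (q / s) dα)).getD (q % s) dβ := by
  induction L generalizing q with
  | nil => simp at hq
  | cons x L ih =>
    have hs : 0 < s := by
      rcases Nat.eq_zero_or_pos s with h0 | h0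
      · subst h0; simp at hq
      · exact h0
    have hx : (f x).length = s := h x (by simp)
    by_cases hlt : q < s
    · have hg : (x :: L).getD (q / s) dα = x := by
        simp [List.getD, Nat.div_eq_of_lt hlt]
      rw [hg]
      simp only [List.flatMap_cons, List.getD_eq_getElem?_getD,
        List.getElem?_append_left (by omega : q < (f x).length)]
      rw [Nat.mod_eq_of_lt hlt]
    · have hq' : q - s < L.length * s := by
        simp only [List.length_cons] at hq
        have : (L.length + 1) * s = L.length * s + s := by ring
        omega
      have hdiv : q / s = (q - s) / s + 1 := Nat.div_eq_sub_div hs (by omega)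
      have hmod : q % s = (q - s) % s := Nat.mod_eq_sub_mod (by omega)
      have hcons : (x :: L).getD (q / s) dα = L.getD ((q - s) / s) dα := by
        simp [List.getD, hdiv]
      rw [hcons, hmod]
      have happ : ((x :: L).flatMap f).getD q dβ = (L.flatMap f).getD (q - s) dβ := by
        simp only [List.flatMap_cons, List.getD_eq_getElem?_getD]
        rw [List.getElem?_append_right (by omega : (f x).length ≤ q), hx]
      rw [happ]
      exact ih (fun y hy => h y (by simp [hy])) (q - s) hq'

theorem getD_mem_of_lt {α : Type} (L : List α) (d : α) {q : Nat} (h : q < L.length) :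
    L.getD q d ∈ L := by
  rw [List.getD_eq_getElem L d h]
  exact List.getElem_mem h

-- abbreviations for the proof (names only; the ports do not use them)
def altS (l : Int) : Nat := 2 ^ l.toNat
def altK (a : List (List Int)) (l : Int) : Nat := a.length / altS l
def altM (a : List (List Int)) (l : Int) : Nat := altK a l * altS l

-- the intermediate matrix of B (same term as in operation8_alt)
def altTrans (a : List (List Int)) (l : Int) : List (List Int) :=
  (List.range (altK a l)).flatMap (fun i => (List.range (altS l)).map (fun x =>
    (List.range (altK a l)).flatMap (fun j =>
      PySem.List.slice (a.getD (j * altS l + x) [])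
        (some ((i * altS l : Nat) : Int)) (some ((i * altS l + altS l : Nat) : Int)))))

theorem operation8_alt_eq (a : List (List Int)) (l : Int) :
    operation8_alt a l =
      ((List.range (altK a l)).reverse.flatMap (fun i => (List.range (altS l)).map (fun x =>
        (altTrans a l).getD (i * altS l + x) [] ++ List.replicate (a.length - altM a l) (0 : Int))))
      ++ List.replicate (a.length - altM a l) (List.replicate a.length (0 : Int)) := rfl

theorem pos_altS (l : Int) : 0 < altS l := Nat.two_pow_pos _

theorem altM_le (a : List (List Int)) (l : Int) : altM a l ≤ a.length :=
  Nat.div_mul_le_self _ _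

-- each row of a that the rotated region reads has length ≥ m (from Pre_)
theorem row_long (a : List (List Int)) (l : Int) (h : Pre_operation8 a l)
    {r : Nat} (hr : r < altM a l) : altM a l ≤ (a.getD r []).length := by
  have hrn : r < a.length := lt_of_lt_of_le hr (altM_le a l)
  have htake : r < (a.take (altM a l)).length := by
    simp only [List.length_take]; omega
  have hmem : (a.take (altM a l))[r] ∈ a.take (altM a l) := List.getElem_mem htake
  have hg : (a.take (altM a l))[r] = a.getD r [] := by
    rw [List.getElem_take, List.getD_eq_getElem a [] hrn]
  rw [hg] at hmem
  have := h.2 (a.getD r []) (by simpa [altM, altK, altS] using hmem)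
  simpa [altM, altK, altS] using this

-- every slice piece of trans is the clamped drop/take
theorem slice_piece (a : List (List Int)) (l : Int) (i j x : Nat) :
    PySem.List.slice (a.getD (j * altS l + x) [])
      (some ((i * altS l : Nat) : Int)) (some ((i * altS l + altS l : Nat) : Int))
      = ((a.getD (j * altS l + x) []).drop (i * altS l)).take (altS l) := by
  rw [PySem.List.slice_natCast]
  congr 1
  omega

theorem piece_len (a : List (List Int)) (l : Int) (h : Pre_operation8 a l)
    {i j x : Nat} (hi : i < altK a l) (hj : j < altK a l) (hx : x < altS l) :
    (((a.getD (j * altS l + x) []).drop (i * altS l)).take (altS l)).length = altS l := by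
  have hrow : altM a l ≤ (a.getD (j * altS l + x) []).length := by
    apply row_long a l h
    calc j * altS l + x < (j + 1) * altS l := by rw [Nat.add_mul, Nat.one_mul]; omega
      _ ≤ altK a l * altS l := Nat.mul_le_mul_right _ hj
  have him : (i + 1) * altS l ≤ altM a l := Nat.mul_le_mul_right _ hi
  simp only [List.length_take, List.length_drop]
  have : (i + 1) * altS l = i * altS l + altS l := by ring
  omega

-- every row of trans has length m
theorem trans_row_len (a : List (List Int)) (l : Int) (h : Pre_operation8 a l)
    (row : List Int) (hrow : row ∈ altTrans a l) : row.length = altM a l := by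
  simp only [altTrans, List.mem_flatMap, List.mem_map, List.mem_range] at hrow
  obtain ⟨i, hi, x, hx, rfl⟩ := hrow
  rw [flatMap_uniform_length _ _ (altS l)]
  · simp [altM]
  · intro j hj
    rw [slice_piece]
    exact piece_len a l h hi (List.mem_range.mp hj) hx

theorem trans_len (a : List (List Int)) (l : Int) :
    (altTrans a l).length = altM a l := by
  rw [altTrans, flatMap_uniform_length _ _ (altS l)]
  · simp [altM]
  · intro i _; simp

-- the row of trans at index i*s+x
theorem trans_row (a : List (List Int)) (l : Int)
    {i x : Nat} (hi : i < altK a l) (hx : x < altS l) :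
    (altTrans a l).getD (i * altS l + x) [] =
      (List.range (altK a l)).flatMap (fun j =>
        PySem.List.slice (a.getD (j * altS l + x) [])
          (some ((i * altS l : Nat) : Int)) (some ((i * altS l + altS l : Nat) : Int))) := by
  rw [altTrans, flatMap_uniform_getD _ _ (altS l) (fun y _ => by simp) _
    (by
      simp only [List.length_range]
      calc i * altS l + x < (i + 1) * altS l := by rw [Nat.add_mul, Nat.one_mul]; omega
        _ ≤ altK a l * altS l := Nat.mul_le_mul_right _ hi) 0 []]
  rw [idx_div hx, idx_mod hx]
  have hgi : (List.range (altK a l)).getD i 0 = i := by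
    simp [List.getD, hi]
  rw [hgi]
  simp [List.getD, hx]

-- entry c of trans row (i,x), c < m
theorem trans_entry (a : List (List Int)) (l : Int) (h : Pre_operation8 a l)
    {i x c : Nat} (hi : i < altK a l) (hx : x < altS l) (hc : c < altM a l) :
    ((altTrans a l).getD (i * altS l + x) []).getD c 0 =
      (a.getD ((c / altS l) * altS l + x) []).getD (i * altS l + c % altS l) 0 := by
  rw [trans_row a l hi hx]
  have hs := pos_altS l
  have hcj : c / altS l < altK a l := (Nat.div_lt_iff_lt_mul hs).2 hc
  rw [flatMap_uniform_getD _ _ (altS l)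
    (fun j hj => by
      rw [slice_piece]
      exact piece_len a l h hi (List.mem_range.mp hj) hx)
    c (by simpa [altM] using hc) 0 0]
  have hg : (List.range (altK a l)).getD (c / altS l) 0 = c / altS l := by
    simp [List.getD, hcj]
  rw [hg, slice_piece]
  simp only [List.getD_eq_getElem?_getD]
  rw [List.getElem?_take_of_lt (Nat.mod_lt _ hs), List.getElem?_drop]

-- getD of the reversed range
theorem rev_range_getD {k q : Nat} (hq : q < k) :
    (List.range k).reverse.getD q 0 = k - 1 - q := by
  have hlen : q < (List.range k).reverse.length := by simp [hq]
  rw [List.getD_eq_getElem _ _ hlen, List.getElem_reverse]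
  simp

-- the row of the final answer, r < m
theorem alt_row_lt (a : List (List Int)) (l : Int)
    {r : Nat} (hrm : r < altM a l) :
    (operation8_alt a l).getD r [] =
      (altTrans a l).getD ((altK a l - 1 - r / altS l) * altS l + r % altS l) []
        ++ List.replicate (a.length - altM a l) (0 : Int) := by
  have hs := pos_altS l
  have hrk : r / altS l < altK a l := (Nat.div_lt_iff_lt_mul hs).2 hrm
  rw [operation8_alt_eq]
  have hlen1 : ((List.range (altK a l)).reverse.flatMap (fun i => (List.range (altS l)).map (fun x =>
      (altTrans a l).getD (i * altS l + x) [] ++ List.replicate (a.length - altM a l) (0 : Int)))).length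
      = altM a l := by
    rw [flatMap_uniform_length _ _ (altS l) (fun x _ => by simp)]
    simp [altM]
  rw [List.getD_eq_getElem?_getD, List.getElem?_append_left (by omega : r < _),
    ← List.getD_eq_getElem?_getD]
  rw [flatMap_uniform_getD _ _ (altS l) (fun y _ => by simp) r
    (by rw [List.length_reverse, List.length_range]; exact hrm) 0 []]
  rw [rev_range_getD hrk]
  simp [List.getD, Nat.mod_lt r hs]

-- the row of the final answer, m ≤ r < n
theorem alt_row_ge (a : List (List Int)) (l : Int)
    {r : Nat} (hrm : ¬ r < altM a l) (hr : r < a.length) :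
    (operation8_alt a l).getD r [] = List.replicate a.length (0 : Int) := by
  rw [operation8_alt_eq]
  have hlen1 : ((List.range (altK a l)).reverse.flatMap (fun i => (List.range (altS l)).map (fun x =>
      (altTrans a l).getD (i * altS l + x) [] ++ List.replicate (a.length - altM a l) (0 : Int)))).length
      = altM a l := by
    rw [flatMap_uniform_length _ _ (altS l) (fun x _ => by simp)]
    simp [altM]
  rw [List.getD_eq_getElem?_getD, List.getElem?_append_right (by omega : _ ≤ r), hlen1,
    List.getElem?_replicate]
  have : r - altM a l < a.length - altM a l := by
    have := altM_le a l
    omega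
  simp [this]

theorem rect_operation8_alt (a : List (List Int)) (l : Int) (h : Pre_operation8 a l) :
    Rect a.length (operation8_alt a l) := by
  rw [operation8_alt_eq]
  have hm := altM_le a l
  have hlen1 : ((List.range (altK a l)).reverse.flatMap (fun i => (List.range (altS l)).map (fun x =>
      (altTrans a l).getD (i * altS l + x) [] ++ List.replicate (a.length - altM a l) (0 : Int)))).length
      = altM a l := by
    rw [flatMap_uniform_length _ _ (altS l) (fun x _ => by simp)]
    simp [altM]
  constructor
  · rw [List.length_append, hlen1, List.length_replicate]
    omega
  · intro row hrow
    rcases List.mem_append.mp hrow with hrow | hrow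
    · simp only [List.mem_flatMap, List.mem_map, List.mem_reverse, List.mem_range] at hrow
      obtain ⟨i, hi, x, hx, rfl⟩ := hrow
      have hidx : i * altS l + x < altM a l := by
        calc i * altS l + x < (i + 1) * altS l := by rw [Nat.add_mul, Nat.one_mul]; omega
          _ ≤ altK a l * altS l := Nat.mul_le_mul_right _ hi
      have hmem : (altTrans a l).getD (i * altS l + x) [] ∈ altTrans a l := by
        apply getD_mem_of_lt
        rw [trans_len]
        exact hidx
      rw [List.length_append, List.length_replicate, trans_row_len a l h _ hmem]
      omega
    · rw [List.eq_of_mem_replicate hrow]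
      simp

theorem get2_operation8_alt (a : List (List Int)) (l : Int) (h : Pre_operation8 a l)
    (r c : Nat) (hr : r < a.length) (hc : c < a.length) :
    get2 (operation8_alt a l) r c =
      if r < altM a l ∧ c < altM a l then gval a (altS l) (altK a l) r c else 0 := by
  have hs := pos_altS l
  have hm := altM_le a l
  unfold get2
  by_cases hrm : r < altM a l
  · rw [alt_row_lt a l hrm]
    have hrk : r / altS l < altK a l := (Nat.div_lt_iff_lt_mul hs).2 hrm
    have hk0 : 0 < altK a l := Nat.lt_of_le_of_lt (Nat.zero_le _) hrk
    have hi : altK a l - 1 - r / altS l < altK a l :=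
      Nat.lt_of_le_of_lt (Nat.sub_le _ _) (Nat.sub_lt hk0 Nat.one_pos)
    have hidx : (altK a l - 1 - r / altS l) * altS l + r % altS l < altM a l := by
      calc (altK a l - 1 - r / altS l) * altS l + r % altS l
          < (altK a l - 1 - r / altS l + 1) * altS l := by
            rw [Nat.add_mul, Nat.one_mul]; exact Nat.add_lt_add_left (Nat.mod_lt _ hs) _
        _ ≤ altK a l * altS l := Nat.mul_le_mul_right _ (by omega)
    have hmem : (altTrans a l).getD ((altK a l - 1 - r / altS l) * altS l + r % altS l) []
        ∈ altTrans a l := by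
      apply getD_mem_of_lt
      rw [trans_len]
      exact hidx
    have hrowlen := trans_row_len a l h _ hmem
    by_cases hcm : c < altM a l
    · rw [List.getD_eq_getElem?_getD, List.getElem?_append_left (by omega : c < _),
        ← List.getD_eq_getElem?_getD]
      rw [trans_entry a l h hi (Nat.mod_lt _ hs) hcm]
      simp only [hrm, hcm, and_self, if_true, gval]
    · rw [List.getD_eq_getElem?_getD, List.getElem?_append_right (by omega : _ ≤ c), hrowlen,
        List.getElem?_replicate]
      have : c - altM a l < a.length - altM a l := by omega
      simp [this, hcm]
  · rw [alt_row_ge a l hrm hr]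
    simp [List.getD_eq_getElem?_getD, hc, hrm]

-- two rectangular matrices with the same get2 are equal
theorem eq_of_get2 {n : Nat} {m1 m2 : List (List Int)} (h1 : Rect n m1) (h2 : Rect n m2)
    (h : ∀ r < n, ∀ c < n, get2 m1 r c = get2 m2 r c) : m1 = m2 := by
  apply List.ext_getElem
  · rw [h1.1, h2.1]
  intro r hr1 hr2
  apply List.ext_getElem
  · rw [h1.2 _ (List.getElem_mem hr1), h2.2 _ (List.getElem_mem hr2)]
  intro c hc1 hc2
  have hrn : r < n := by rwa [h1.1] at hr1
  have hcn : c < n := by rw [h1.2 _ (List.getElem_mem hr1)] at hc1; exact hc1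
  have e1 : m1[r][c] = get2 m1 r c := by simp [get2, List.getD, hr1, hc1]
  have e2 : m2[r][c] = get2 m2 r c := by simp [get2, List.getD, hr2, hc2]
  rw [e1, e2, h r hrn c hcn]

-- ===== VERDICT (by name: the statement is the Claim_ definition above) =====
theorem operation8_spec : Claim_equal_operation8 := by
  intro a l _ hpre
  unfold Spec_operation8
  apply eq_of_get2 (rect_operation8 a l) (rect_operation8_alt a l hpre)
  intro r hr c hc
  rw [get2_operation8, get2_operation8_alt a l hpre r c hr hc]
  rfl
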